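-- pv_equiv track=rewrite | github.com/miliar/Code_Jam_Webscraper | solutions_python/Problem_199/3629.py | check
-- ===== SOURCE A (Python) =====
-- def check(row):
--     ok = False
--     idx=0
--     while idx < len(row) and row[idx] == '+':
--         idx += 1
--     if idx == len(row):
--         ok = True
--     return ok
-- ===== SOURCE B (Python) =====
-- def check(row):
--     return set(row) <= {'+'}
-- ===== Notes on version B (the rewrite author's own statement) =====
-- stated objective: idiomatic
-- what changed: Replaced the positional early-exit while loop (advance an index over '+' then compare with len) by building the set of distinct characters and testing subset of {'+'}.
import Mathlib
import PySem

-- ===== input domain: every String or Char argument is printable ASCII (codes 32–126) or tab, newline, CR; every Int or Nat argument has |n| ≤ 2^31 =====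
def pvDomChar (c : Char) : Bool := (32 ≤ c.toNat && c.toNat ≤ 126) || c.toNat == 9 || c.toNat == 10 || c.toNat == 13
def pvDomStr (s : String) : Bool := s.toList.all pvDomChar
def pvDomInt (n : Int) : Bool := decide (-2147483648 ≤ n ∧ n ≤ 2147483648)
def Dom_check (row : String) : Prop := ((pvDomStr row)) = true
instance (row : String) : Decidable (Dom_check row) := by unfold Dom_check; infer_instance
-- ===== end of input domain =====

-- B replaces A's early-exit index scan by a distinct-character set and a subset test of {'+'} (idiomatic).


-- ===== PORT A =====
-- the while loop: advance idx while idx < len(row) and row[idx] == '+'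
def checkLoop (cs : List Char) (idx : Nat) : Nat :=
  if h : idx < cs.length ∧ cs[idx]! = '+' then checkLoop cs (idx + 1) else idx
  termination_by cs.length - idx

def check (row : String) : Bool :=
  let cs := row.toList
  let ok := false
  let idx := checkLoop cs 0
  let ok := if idx = cs.length then true else ok
  ok

-- ===== PORT B =====
def check_alt (row : String) : Bool :=
  PySem.Set.issubset (PySem.Set.ofList row.toList) ['+']

-- ===== PRECONDITION & SPEC =====
def Spec_check (row : String) (out : Bool) : Prop := out = check_alt row
instance (row : String) (out : Bool) : Decidable (Spec_check row out) := by unfold Spec_check; infer_instance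

-- ===== CLAIM (what is proved, stated in full; the proofs are below) =====
def Claim_equal_check : Prop := ∀ (row : String), Dom_check row → Spec_check row (check row)

-- ===== LEMMAS AND PROOFS =====

-- A's loop, started at idx, reaches the length iff every character from idx on is '+'.
theorem checkLoop_eq_length_iff (cs : List Char) (idx : Nat) (hle : idx ≤ cs.length) :
    checkLoop cs idx = cs.length ↔ ∀ j, idx ≤ j → (h : j < cs.length) → cs[j] = '+' := by
  fun_induction checkLoop cs idx with
  | case1 idx h ih =>
    rw [ih (by omega)]
    constructor
    · intro H j hj hlt
      rcases Nat.eq_or_lt_of_le hj with rfl | hlt'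
      · simpa [List.getElem!_eq_getElem?_getD, hlt] using h.2
      · exact H j hlt' hlt
    · intro H j hj hlt
      exact H j (Nat.le_of_succ_le hj) hlt
  | case2 idx h =>
    constructor
    · intro H j hj hlt
      omega
    · intro H
      push Not at h
      rcases Nat.lt_or_ge idx cs.length with hlt | hge
      · have h1 := h hlt
        have h2 := H idx (le_refl _) hlt
        simp [hlt, h2] at h1
      · omega

theorem check_alt_iff (row : String) :
    check_alt row = true ↔ ∀ c ∈ row.toList, c = '+' := by
  unfold check_alt
  rw [PySem.Set.issubset_iff]
  constructor
  · intro H c hc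
    have := H c (by rw [PySem.Set.mem_ofList]; exact hc)
    simpa using this
  · intro H c hc
    rw [PySem.Set.mem_ofList] at hc
    simp [H c hc]

-- ===== VERDICT (by name: the statement is the Claim_ definition above) =====
theorem check_spec : Claim_equal_check := by
  intro row _
  unfold Spec_check check
  simp only []
  by_cases h : ∀ c ∈ row.toList, c = '+'
  · have hA : checkLoop row.toList 0 = row.toList.length := by
      rw [checkLoop_eq_length_iff _ _ (Nat.zero_le _)]
      intro j _ hlt
      exact h _ (List.getElem_mem hlt)
    have hB : check_alt row = true := (check_alt_iff row).2 h
    have hA' : checkLoop row.toList 0 = row.length := by simpa using hA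
    simp [hA', hB]
  · have hA : checkLoop row.toList 0 ≠ row.toList.length := by
      intro hlen
      rw [checkLoop_eq_length_iff _ _ (Nat.zero_le _)] at hlen
      apply h
      intro c hc
      obtain ⟨j, hj, rfl⟩ := List.getElem_of_mem hc
      exact hlen j (Nat.zero_le _) hj
    have hB : check_alt row = false := by
      rw [← Bool.not_eq_true, check_alt_iff]; exact h
    have hA' : checkLoop row.toList 0 ≠ row.length := by simpa using hA
    simp [hA', hB]
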